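-- pv_equiv track=rewrite | github.com/KarinaUndalova/algorithm_tasks | nearest_zero.py | calculate
-- ===== SOURCE A (Python) =====
-- from typing import List
--
-- def calculate(numbers: List[int], length: int) -> List[int]:
--     distance = []
--     zero_position = None
--     for i, value in enumerate(numbers):
--         if value == 0:
--             zero_position = i
--             distance.append(0)
--             continue
--         if zero_position is not None:
--             distance.append(i - zero_position)
--         else:
--             distance.append(length)
--     return distance
-- ===== SOURCE B (Python) =====
-- from typing import List, Optional
--
-- def calculate(numbers: List[int], length: int) -> List[int]:
--     # pass 1: index of the nearest zero at position <= i (None before any zero)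
--     prev: List[Optional[int]] = []
--     last: Optional[int] = None
--     for v in numbers:
--         if v == 0:
--             last = len(prev)
--         prev.append(last)
--     # pass 2: turn the governing-zero table into distances
--     out: List[int] = []
--     for i, (v, p) in enumerate(zip(numbers, prev)):
--         if v == 0:
--             out.append(0)
--         elif p is None:
--             out.append(length)
--         else:
--             out.append(i - p)
--     return out
-- ===== Notes on version B (the rewrite author's own statement) =====
-- stated objective: alternative
-- what changed: Replaces A's single fused loop carrying the last-zero position with two separately shaped passes: one builds a prev-zero index table, a second pass over the zipped table computes each distance.
import Mathlib
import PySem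

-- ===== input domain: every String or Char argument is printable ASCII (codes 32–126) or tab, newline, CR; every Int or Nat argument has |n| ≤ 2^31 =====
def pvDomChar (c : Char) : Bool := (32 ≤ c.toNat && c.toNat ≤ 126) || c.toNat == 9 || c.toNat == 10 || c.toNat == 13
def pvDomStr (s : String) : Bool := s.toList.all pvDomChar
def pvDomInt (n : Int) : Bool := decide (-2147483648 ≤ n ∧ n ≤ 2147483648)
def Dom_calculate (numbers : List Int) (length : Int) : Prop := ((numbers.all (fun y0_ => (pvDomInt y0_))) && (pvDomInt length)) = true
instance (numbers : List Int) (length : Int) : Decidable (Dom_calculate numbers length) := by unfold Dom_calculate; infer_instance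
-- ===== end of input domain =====

-- B replaces A's fused loop by two passes (a prev-zero index table, then a distance pass); same O(n) cost, alternative decomposition.

-- ===== PORT A =====
-- one fused loop: carries (distance list, zero_position) through enumerate(numbers)
def calculate (numbers : List Int) (length : Int) : List Int :=
  ((PySem.List.enumerate numbers 0).foldl
    (fun (s : List Int × Option Int) (iv : Int × Int) =>
      if iv.2 == 0 then (s.1 ++ [(0 : Int)], some iv.1)
      else match s.2 with
        | some z => (s.1 ++ [iv.1 - z], s.2)
        | none   => (s.1 ++ [length], s.2))
    ([], none)).1

-- ===== PORT B =====
-- pass 1 of Source B: prev[i] = index of nearest zero at position ≤ i (none before any zero); last = len(prev) uses the list length so far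
def calcPrev (numbers : List Int) : List (Option Int) :=
  (numbers.foldl
    (fun (s : List (Option Int) × Option Int) v =>
      let last := if v == 0 then some (Int.ofNat s.1.length) else s.2
      (s.1 ++ [last], last))
    ([], none)).1

-- pass 2 of Source B: enumerate(zip(numbers, prev)) → distances
def calculate_alt (numbers : List Int) (length : Int) : List Int :=
  (PySem.List.enumerate (numbers.zip (calcPrev numbers)) 0).foldl
    (fun (out : List Int) (ivp : Int × (Int × Option Int)) =>
      if ivp.2.1 == 0 then out ++ [(0 : Int)]
      else match ivp.2.2 with
        | none   => out ++ [length]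
        | some p => out ++ [ivp.1 - p])
    []

-- ===== PRECONDITION & SPEC =====
def Spec_calculate (numbers : List Int) (length : Int) (out : List Int) : Prop := out = calculate_alt numbers length
instance (numbers : List Int) (length : Int) (out : List Int) : Decidable (Spec_calculate numbers length out) := by unfold Spec_calculate; infer_instance

-- ===== CLAIM (what is proved, stated in full; the proofs are below) =====
def Claim_equal_calculate : Prop := ∀ (numbers : List Int) (length : Int), Dom_calculate numbers length → Spec_calculate numbers length (calculate numbers length)

-- ===== LEMMAS AND PROOFS =====

-- reference recursion: distances for tail t, current index i, last zero index z
def refA (length : Int) : List Int → Int → Option Int → List Int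
  | [], _, _ => []
  | v :: t, i, z =>
    if v = 0 then 0 :: refA length t (i + 1) (some i)
    else (match z with | some p => i - p | none => length) :: refA length t (i + 1) z

-- reference recursion for B's first pass
def refP : List Int → Int → Option Int → List (Option Int)
  | [], _, _ => []
  | v :: t, i, z =>
    let last := if v = 0 then some i else z
    last :: refP t (i + 1) last

theorem foldA_eq (length : Int) (t : List Int) :
    ∀ (s : Int) (acc : List Int) (z : Option Int),
    ((PySem.List.enumerate t s).foldl
      (fun (st : List Int × Option Int) (iv : Int × Int) =>
        if iv.2 == 0 then (st.1 ++ [(0 : Int)], some iv.1)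
        else match st.2 with
          | some p => (st.1 ++ [iv.1 - p], st.2)
          | none   => (st.1 ++ [length], st.2))
      (acc, z)).1 = acc ++ refA length t s z := by
  induction t with
  | nil => intro s acc z; simp [PySem.List.enumerate_nil, refA]
  | cons v t ih =>
    intro s acc z
    by_cases hv : v = 0
    · subst hv
      simp only [PySem.List.enumerate_cons, List.foldl_cons, beq_self_eq_true, if_true]
      rw [ih]
      simp [refA]
    · have hb : (v == 0) = false := by simp [hv]
      cases z with
      | none =>
        simp only [PySem.List.enumerate_cons, List.foldl_cons, hb, Bool.false_eq_true, if_false]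
        rw [ih]
        simp [refA, hv]
      | some p =>
        simp only [PySem.List.enumerate_cons, List.foldl_cons, hb, Bool.false_eq_true, if_false]
        rw [ih]
        simp [refA, hv]

theorem foldP_eq (t : List Int) :
    ∀ (acc : List (Option Int)) (z : Option Int),
    (t.foldl
      (fun (s : List (Option Int) × Option Int) v =>
        let last := if v == 0 then some (Int.ofNat s.1.length) else s.2
        (s.1 ++ [last], last))
      (acc, z)).1 = acc ++ refP t (Int.ofNat acc.length) z := by
  induction t with
  | nil => intro acc z; simp [refP]
  | cons v t ih =>
    intro acc z
    by_cases hv : v = 0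
    · subst hv
      simp only [List.foldl_cons, beq_self_eq_true, if_true]
      rw [ih]
      simp [refP]
    · have hb : (v == 0) = false := by simp [hv]
      simp only [List.foldl_cons, hb, Bool.false_eq_true, if_false]
      rw [ih]
      simp [refP, hv]

theorem foldB_eq (length : Int) (t : List Int) :
    ∀ (s : Int) (z : Option Int) (out : List Int),
    (PySem.List.enumerate (t.zip (refP t s z)) s).foldl
      (fun (o : List Int) (ivp : Int × (Int × Option Int)) =>
        if ivp.2.1 == 0 then o ++ [(0 : Int)]
        else match ivp.2.2 with
          | none   => o ++ [length]
          | some p => o ++ [ivp.1 - p])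
      out = out ++ refA length t s z := by
  induction t with
  | nil => intro s z out; simp [PySem.List.enumerate_nil, refA, refP]
  | cons v t ih =>
    intro s z out
    by_cases hv : v = 0
    · simp only [refP, hv, if_true, List.zip_cons_cons, PySem.List.enumerate_cons,
        List.foldl_cons, beq_self_eq_true, refA]
      rw [ih]
      simp
    · have hb : (v == 0) = false := by simp [hv]
      cases z with
      | none =>
        simp only [refP, hv, if_false, List.zip_cons_cons, PySem.List.enumerate_cons,
          List.foldl_cons, hb, refA]
        rw [ih]
        simp
      | some p =>
        simp only [refP, hv, if_false, List.zip_cons_cons, PySem.List.enumerate_cons,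
          List.foldl_cons, hb, refA]
        rw [ih]
        simp

theorem calcPrev_eq (numbers : List Int) : calcPrev numbers = refP numbers 0 none := by
  unfold calcPrev
  rw [foldP_eq]
  simp

-- ===== VERDICT (by name: the statement is the Claim_ definition above) =====
theorem calculate_spec : Claim_equal_calculate := by
  intro numbers length _
  unfold Spec_calculate calculate calculate_alt
  rw [calcPrev_eq, foldA_eq, foldB_eq]
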